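-- pv_equiv track=rewrite | github.com/RodrigoG13/TeoriaComputacion | protocolo/p2.py | filtrar_palabras
-- ===== SOURCE A (Python) =====
-- def automata_paridad(palabra: str) -> int:
--     """Función que pasa una palabra por el autómata de paridad y devuelve el estado en que se
--         quedó
--
--     Args:
--         palabra (str): Palabra que se testeará
--
--     Returns:
--         int: Estado en el que se quedó el autómata
--     """
--
--     estado = 0
--     for caracter in palabra:
--         match estado:
--             case 0:
--                 if caracter == "0":
--                     estado = 1
--                 else:
--                     estado = 3
--
--             case 1:
--                 if caracter == "0":
--                     estado = 0
--                 else: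
--                     estado = 2
--
--             case 2:
--                 if caracter == "0":
--                     estado = 3
--                 else:
--                     estado = 1
--
--             case 3:
--                 if caracter == "0":
--                     estado = 2
--                 else:
--                     estado = 0
--         continue
--     return estado
--
-- def filtrar_palabras(palabras:list) -> tuple:
--     """Función que clasifica las palabras en rechazadas o aceptadas, según el autómata de paridad
--
--     Args:
--         palabras (list): Lista de palabras a clasificar
--
--     Returns:
--         tuple: Palabras aceptadas y rechazadas por el algoritmo
--     """
--
--     aceptadas = []
--     rechazadas = []
--     while len(palabras):
--         edo = automata_paridad(palabras[0])
--
--         if edo == 0: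
--             aceptadas.append(palabras.pop(0))
--
--         else:
--             rechazadas.append(palabras.pop(0))
--     return aceptadas, rechazadas
-- ===== SOURCE B (Python) =====
-- def filtrar_palabras(palabras: list) -> tuple:
--     """Clasifica las palabras en aceptadas/rechazadas por el automata de paridad.
--
--     The 4-state DFA accepts exactly the words with an even number of '0's and
--     an even number of non-'0' symbols, so we classify by that closed form.
--     Like the original, the input list is emptied in place.
--     """
--     aceptadas = [p for p in palabras
--                  if p.count("0") % 2 == 0 and (len(p) - p.count("0")) % 2 == 0]
--     rechazadas = [p for p in palabras
--                   if not (p.count("0") % 2 == 0 and (len(p) - p.count("0")) % 2 == 0)]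
--     palabras.clear()
--     return aceptadas, rechazadas
-- ===== Notes on version B (the rewrite author's own statement) =====
-- stated objective: faster
-- what changed: Replaces the hand-written 4-state parity DFA plus the quadratic while/pop(0) loop with a closed-form parity test (even count of '0's and even count of non-'0's) applied in two list comprehensions.
import Mathlib
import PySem

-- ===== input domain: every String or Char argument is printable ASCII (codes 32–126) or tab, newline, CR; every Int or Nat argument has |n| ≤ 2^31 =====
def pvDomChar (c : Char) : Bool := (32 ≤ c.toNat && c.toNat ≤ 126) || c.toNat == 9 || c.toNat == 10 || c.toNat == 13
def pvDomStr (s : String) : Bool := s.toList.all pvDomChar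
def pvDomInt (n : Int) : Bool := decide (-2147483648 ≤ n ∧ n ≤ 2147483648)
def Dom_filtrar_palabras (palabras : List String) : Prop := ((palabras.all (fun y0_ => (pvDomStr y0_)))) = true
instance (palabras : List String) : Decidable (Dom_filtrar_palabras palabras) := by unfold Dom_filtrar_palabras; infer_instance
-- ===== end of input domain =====

-- B replaces A's 4-state parity DFA and quadratic pop(0) loop with a closed-form parity test
-- in two list comprehensions (objective: faster, measured). Equivalence is about the return
-- value; both A and B empty the input list in place.


-- ===== PORT A =====
-- one transition step of the match statement (no matching case leaves estado unchanged)
def pasoA (estado : Int) (caracter : Char) : Int :=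
  if estado = 0 then (if caracter = '0' then 1 else 3)
  else if estado = 1 then (if caracter = '0' then 0 else 2)
  else if estado = 2 then (if caracter = '0' then 3 else 1)
  else if estado = 3 then (if caracter = '0' then 2 else 0)
  else estado

def automata_paridad (palabra : String) : Int :=
  palabra.toList.foldl pasoA 0

-- the 'while len(palabras): … pop(0)' loop: consume the front, append to one of the two lists
def filtrarGo : List String → List String → List String → List String × List String
  | [], aceptadas, rechazadas => (aceptadas, rechazadas)
  | p :: resto, aceptadas, rechazadas =>
    if automata_paridad p = 0 then filtrarGo resto (aceptadas ++ [p]) rechazadas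
    else filtrarGo resto aceptadas (rechazadas ++ [p])

def filtrar_palabras (palabras : List String) : List String × List String :=
  filtrarGo palabras [] []

-- ===== PORT B =====
def pyAccept (p : String) : Bool :=
  PySem.Int.mod ((PySem.Str.count p "0" : Nat) : Int) 2 == 0 &&
  PySem.Int.mod (PySem.Str.len p - ((PySem.Str.count p "0" : Nat) : Int)) 2 == 0

def filtrar_palabras_alt (palabras : List String) : List String × List String :=
  (palabras.filter (fun p => pyAccept p), palabras.filter (fun p => !pyAccept p))

-- ===== PRECONDITION & SPEC =====
def Spec_filtrar_palabras (palabras : List String) (out : List String × List String) : Prop := out = filtrar_palabras_alt palabras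
instance (palabras : List String) (out : List String × List String) : Decidable (Spec_filtrar_palabras palabras out) := by unfold Spec_filtrar_palabras; infer_instance

-- ===== CLAIM (what is proved, stated in full; the proofs are below) =====
def Claim_equal_filtrar_palabras : Prop := ∀ (palabras : List String), Dom_filtrar_palabras palabras → Spec_filtrar_palabras palabras (filtrar_palabras palabras)

-- ===== LEMMAS AND PROOFS =====

-- PySem.Chars.count with a single-character needle is List.count
theorem pv_count_go_singleton (c : Char) : ∀ (l : List Char) (fuel acc : Nat), l.length ≤ fuel →
    PySem.Chars.count.go [c] fuel l acc = acc + l.count c := by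
  intro l
  induction l with
  | nil => intro fuel acc h; cases fuel <;> simp [PySem.Chars.count.go]
  | cons x t ih =>
    intro fuel acc h
    cases fuel with
    | zero => simp at h
    | succ f =>
      have ht : t.length ≤ f := by simpa using h
      simp only [PySem.Chars.count.go, List.isPrefixOf, List.length_cons]
      by_cases hx : c = x
      · subst hx
        simp [ih f (acc+1) ht]
        omega
      · simp [hx, ih f acc ht, Ne.symm hx]

theorem pv_count_singleton (c : Char) (l : List Char) :
    PySem.Chars.count l [c] = l.count c := by
  simp [PySem.Chars.count, pv_count_go_singleton c l l.length 0 le_rfl]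

-- encoding of the DFA state by the two parities: (parity of '0's, parity of non-'0's)
def encSt (a b : Bool) : Int :=
  if a then (if b then 2 else 1) else (if b then 3 else 0)

theorem pv_paso_enc (a b : Bool) (c : Char) :
    pasoA (encSt a b) c = encSt (xor a (c == '0')) (xor b (!(c == '0'))) := by
  by_cases hc : c = '0' <;> cases a <;> cases b <;> simp [pasoA, encSt, hc]

def zpar (l : List Char) : Bool := decide (l.count '0' % 2 = 1)
def opar (l : List Char) : Bool := decide (l.countP (fun c => !(c == '0')) % 2 = 1)

theorem pv_zpar_cons (c : Char) (t : List Char) :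
    zpar (c :: t) = xor (c == '0') (zpar t) := by
  by_cases hc : c = '0' <;>
    rcases Nat.mod_two_eq_zero_or_one (t.count '0') with h | h <;>
    simp [zpar, hc, Nat.add_mod, h]

theorem pv_opar_cons (c : Char) (t : List Char) :
    opar (c :: t) = xor (!(c == '0')) (opar t) := by
  by_cases hc : c = '0' <;>
    rcases Nat.mod_two_eq_zero_or_one (t.countP (fun c => !(c == '0'))) with h | h <;>
    simp [opar, hc, Nat.add_mod, h]

theorem pv_fold_enc : ∀ (l : List Char) (a b : Bool),
    l.foldl pasoA (encSt a b) = encSt (xor a (zpar l)) (xor b (opar l)) := by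
  intro l
  induction l with
  | nil => intro a b; simp [zpar, opar]
  | cons c t ih =>
    intro a b
    rw [List.foldl_cons, pv_paso_enc, ih, pv_zpar_cons, pv_opar_cons]
    congr 1 <;> cases a <;> cases b <;> cases (c == '0') <;> simp
  
theorem pv_auto_eq (p : String) :
    automata_paridad p = encSt (zpar p.toList) (opar p.toList) := by
  have := pv_fold_enc p.toList false false
  simpa [automata_paridad, encSt] using this

theorem pv_accept_iff (p : String) :
    pyAccept p = decide (automata_paridad p = 0) := by
  have hz : (PySem.Str.count p "0" : Nat) = p.toList.count '0' := by
    simp [pv_count_singleton]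
  have hlen : PySem.Str.len p = (p.toList.length : Int) := by simp
  have hle : p.toList.count '0' ≤ p.toList.length := List.count_le_length
  have hsplit : p.toList.length = p.toList.count '0' + p.toList.countP (fun c => !(c == '0')) := by
    have := List.length_eq_countP_add_countP (l := p.toList) (p := fun c => c == '0')
    simpa [List.count] using this
  have hm : ∀ n : Int, PySem.Int.mod n 2 = n % 2 := by
    intro n; simp only [PySem.Int.mod]; rw [Int.fmod_eq_emod]; norm_num
  rw [pv_auto_eq]
  simp only [pyAccept, hz, hlen, hm]
  set z := p.toList.count '0' with hzdef
  set o := p.toList.countP (fun c => !(c == '0')) with hodef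
  have h2 : ((p.toList.length : Int) - (z : Int)) % 2 = ((o : Nat) : Int) % 2 := by
    have : ((p.toList.length : Int) - (z : Int)) = ((o : Nat) : Int) := by
      rw [hsplit]; push_cast; ring
    rw [this]
  rw [h2]
  rcases Nat.mod_two_eq_zero_or_one z with hz2 | hz2 <;>
    rcases Nat.mod_two_eq_zero_or_one o with ho2 | ho2 <;>
    simp [zpar, opar, encSt, ← hzdef, ← hodef, hz2, ho2] <;>
    omega

theorem pv_go_eq (l : List String) : ∀ (ac re : List String),
    filtrarGo l ac re =
      (ac ++ l.filter (fun p => pyAccept p), re ++ l.filter (fun p => !pyAccept p)) := by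
  induction l with
  | nil => intro ac re; simp [filtrarGo]
  | cons p t ih =>
    intro ac re
    by_cases h : automata_paridad p = 0
    · have hb : pyAccept p = true := by rw [pv_accept_iff]; simp [h]
      simp [filtrarGo, h, ih, hb]
    · have hb : pyAccept p = false := by rw [pv_accept_iff]; simp [h]
      simp [filtrarGo, h, ih, hb]

-- ===== VERDICT (by name: the statement is the Claim_ definition above) =====
theorem filtrar_palabras_spec : Claim_equal_filtrar_palabras := by
  intro palabras _
  unfold Spec_filtrar_palabras filtrar_palabras filtrar_palabras_alt
  rw [pv_go_eq]
  simp
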